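-- pv_equiv track=rewrite | github.com/TheVosges/n-gram-finder- | ngramy.py | anb
-- ===== SOURCE A (Python) =====
-- from copy import deepcopy
--
-- def anb(tab_napis1,tab_napis2):
--     """ Funkcja znajdująca częsc wspolna tablic n-gramow
--
--             Args:
--                 tab_napis1 (list): tablica n-gramow pierwszego wyrazu
--                 tab_napis2 (list): tablica n-gramow drugiego wyrazu
--             Returns:
--                 aub (list): tablica czesci wspolnej ngramow wyrazow dla kolejno (2-gramów, 3-gramów i 4-gramów)
--     """
--     if not isinstance(tab_napis1, list) or not isinstance(tab_napis2, list):
--         raise TypeError("Błędny typ danych")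
--     for i in tab_napis1:
--         for z in i:
--             if not isinstance(z, str):
--                 raise ValueError("Błędny typ danych")
--     for i in tab_napis2:
--         for z in i:
--             if not isinstance(z, str):
--                 raise ValueError("Błędny typ danych")
--     anb = []
--     anb_pomoc = []
--     i_anb=0
--     while i_anb<=(len(tab_napis1)-1):
--         tab_pomoc1 = deepcopy(tab_napis1[i_anb])
--         tab_pomoc2 = deepcopy(tab_napis2[i_anb])
--         i_pomoc1 = 0
--         i_pomoc2 = 0
--         while i_pomoc1 <= (len(tab_pomoc1)-1):
--             while i_pomoc2 <= (len(tab_pomoc2)-1):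
--                 if tab_pomoc2[i_pomoc2] == tab_pomoc1[i_pomoc1]:
--                     if tab_pomoc2[i_pomoc2] not in anb_pomoc:
--                         anb_pomoc.append(tab_pomoc2[i_pomoc2]) #dopisywane do tablicy anb_pomoc sa wartosci ktore znajduja sie w obu tablicach poczatkowych i nie sa juz w tablicy anb
--                 i_pomoc2+=1
--             i_pomoc2=0
--             i_pomoc1+=1
--         anb.append(anb_pomoc) #anb_pomoc do anb
--         anb_pomoc = []
--         i_anb+=1
--     return anb
-- ===== SOURCE B (Python) =====
-- def anb(tab_napis1, tab_napis2):
--     if not isinstance(tab_napis1, list) or not isinstance(tab_napis2, list):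
--         raise TypeError("Błędny typ danych")
--     for i in tab_napis1:
--         for z in i:
--             if not isinstance(z, str):
--                 raise ValueError("Błędny typ danych")
--     for i in tab_napis2:
--         for z in i:
--             if not isinstance(z, str):
--                 raise ValueError("Błędny typ danych")
--     result = []
--     for i in range(len(tab_napis1)):
--         common = set(tab_napis1[i]) & set(tab_napis2[i])
--         result.append([x for x in dict.fromkeys(tab_napis1[i]) if x in common])
--     return result
-- ===== Notes on version B (the rewrite author's own statement) =====
-- stated objective: idiomatic
-- what changed: A's three nested index-driven while loops with a linear 'not in' scan against the growing result are replaced by a per-group set intersection plus an ordered dedup (dict.fromkeys) of the first list, filtered by membership in the intersection.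
import Mathlib
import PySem

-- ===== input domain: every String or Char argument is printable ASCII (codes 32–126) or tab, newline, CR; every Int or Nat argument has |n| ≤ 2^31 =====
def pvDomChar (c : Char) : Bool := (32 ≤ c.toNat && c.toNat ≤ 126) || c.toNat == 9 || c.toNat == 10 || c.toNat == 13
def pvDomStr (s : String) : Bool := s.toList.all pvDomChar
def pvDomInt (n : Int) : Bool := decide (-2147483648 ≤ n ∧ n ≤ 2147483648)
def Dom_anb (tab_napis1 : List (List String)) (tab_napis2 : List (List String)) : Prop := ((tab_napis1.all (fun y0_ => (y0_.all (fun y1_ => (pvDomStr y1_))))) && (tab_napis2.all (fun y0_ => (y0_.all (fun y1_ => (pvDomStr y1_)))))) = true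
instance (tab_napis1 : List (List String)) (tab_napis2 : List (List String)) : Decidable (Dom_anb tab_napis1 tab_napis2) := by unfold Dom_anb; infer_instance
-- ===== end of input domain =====

-- B replaces A's hand-written nested index-scans (quadratic membership against the growing result)
-- with a per-group set intersection plus an ordered dedup of the first list — idiomatic Python.
-- Return-value equivalence only; neither version mutates its arguments (A deepcopies).

-- ===== PORT A =====
-- inner 'while i_pomoc2' loop: scan tab_pomoc2, append matches not yet collected
def anbLoop2 (x : String) : List String → List String → List String
  | [], acc => acc
  | y :: ys, acc => anbLoop2 x ys (if y = x ∧ y ∉ acc then acc ++ [y] else acc)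

-- middle 'while i_pomoc1' loop: run the inner loop for each element of tab_pomoc1
def anbLoop1 (l2 : List String) : List String → List String → List String
  | [], acc => acc
  | x :: xs, acc => anbLoop1 l2 xs (anbLoop2 x l2 acc)

-- outer 'while i_anb' loop: one group per index of tab_napis1 (tab_napis2[i_anb] would raise
-- IndexError when out of range — excluded by Pre_anb, total form via getD)
def anb (tab_napis1 : List (List String)) (tab_napis2 : List (List String)) : List (List String) :=
  (List.range tab_napis1.length).map (fun i =>
    anbLoop1 ((PySem.List.pyGet? tab_napis2 (i : Int)).getD [])
      ((PySem.List.pyGet? tab_napis1 (i : Int)).getD []) [])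

-- ===== PORT B =====
def anb_alt (tab_napis1 : List (List String)) (tab_napis2 : List (List String)) : List (List String) :=
  (List.range tab_napis1.length).map (fun i =>
    let l1 := (PySem.List.pyGet? tab_napis1 (i : Int)).getD []
    let l2 := (PySem.List.pyGet? tab_napis2 (i : Int)).getD []
    let common : PySem.Set String := PySem.Set.inter (PySem.Set.ofList l1) (PySem.Set.ofList l2)
    (PySem.List.dedup l1).filter (fun x => PySem.Set.contains common x))

-- ===== PRECONDITION & SPEC =====
-- A indexes tab_napis2[i] for every i < len(tab_napis1): a shorter tab_napis2 raises IndexError.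
def Pre_anb (tab_napis1 : List (List String)) (tab_napis2 : List (List String)) : Prop :=
  tab_napis1.length ≤ tab_napis2.length
instance (tab_napis1 : List (List String)) (tab_napis2 : List (List String)) : Decidable (Pre_anb tab_napis1 tab_napis2) := by unfold Pre_anb; infer_instance

def pvWitness_anb : List (List String) × List (List String) :=
  ([["ab", "bc", "ab"], ["xy"]], [["bc", "zz", "ab"], ["qq"]])

def Spec_anb (tab_napis1 : List (List String)) (tab_napis2 : List (List String)) (out : List (List String)) : Prop := out = anb_alt tab_napis1 tab_napis2
instance (tab_napis1 : List (List String)) (tab_napis2 : List (List String)) (out : List (List String)) : Decidable (Spec_anb tab_napis1 tab_napis2 out) := by unfold Spec_anb; infer_instance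

-- ===== CLAIM (what is proved, stated in full; the proofs are below) =====
def Claim_equal_anb : Prop := ∀ (tab_napis1 : List (List String)) (tab_napis2 : List (List String)), Dom_anb tab_napis1 tab_napis2 → Pre_anb tab_napis1 tab_napis2 → Spec_anb tab_napis1 tab_napis2 (anb tab_napis1 tab_napis2)

-- ===== LEMMAS AND PROOFS =====

-- ordered first-occurrence dedup relative to an already-seen list (proof helper)
def dseen (seen : List String) : List String → List String
  | [] => []
  | x :: xs => if x ∈ seen then dseen seen xs else x :: dseen (seen ++ [x]) xs

theorem dseen_congr (s t : List String) (hs : ∀ a, a ∈ s ↔ a ∈ t) (xs : List String) :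
    dseen s xs = dseen t xs := by
  induction xs generalizing s t with
  | nil => rfl
  | cons x xs ih =>
    simp only [dseen]
    by_cases hx : x ∈ s
    · rw [if_pos hx, if_pos ((hs x).1 hx)]
      exact ih s t hs
    · rw [if_neg hx, if_neg (fun h => hx ((hs x).2 h))]
      refine congrArg _ (ih _ _ (fun a => ?_))
      simp [hs a]

theorem foldl_add_eq_dseen (xs s : List String) :
    xs.foldl PySem.Set.add s = s ++ dseen s xs := by
  induction xs generalizing s with
  | nil => simp [dseen]
  | cons x xs ih =>
    simp only [List.foldl_cons, dseen, PySem.Set.add, PySem.Set.contains]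
    by_cases hx : x ∈ s
    · simp [hx, ih]
    · rw [if_neg (by simp [hx]), if_neg hx, ih (s ++ [x])]
      simp

theorem dedup_eq_dseen (xs : List String) : PySem.List.dedup xs = dseen [] xs := by
  have h := foldl_add_eq_dseen xs []
  simpa [PySem.List.dedup, PySem.Set.ofList] using h

theorem anbLoop2_eq (x : String) (l2 acc : List String) :
    anbLoop2 x l2 acc = if x ∈ l2 ∧ x ∉ acc then acc ++ [x] else acc := by
  induction l2 generalizing acc with
  | nil => simp [anbLoop2]
  | cons y ys ih =>
    simp only [anbLoop2]
    by_cases hy : y = x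
    · subst hy
      by_cases ha : y ∈ acc
      · simp [ha, ih]
      · simp [ha, ih]
    · by_cases ha : x ∈ acc
      · simp [hy, ha, ih]
      · simp [hy, ha, ih, Ne.symm hy]

-- extending 'seen' with an element the filter rejects does not change the filtered dedup
theorem dseen_filter_extra (l2 : List String) (x : String) (hx : x ∉ l2) :
    ∀ (xs seen : List String),
      (dseen (seen ++ [x]) xs).filter (fun a => decide (a ∈ l2)) =
      (dseen seen xs).filter (fun a => decide (a ∈ l2)) := by
  intro xs
  induction xs with
  | nil => intro seen; rfl
  | cons y ys ih =>
    intro seen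
    simp only [dseen]
    by_cases hy : y = x
    · subst hy
      by_cases hs : y ∈ seen
      · rw [if_pos (by simp [hs]), if_pos hs]
        exact ih seen
      · rw [if_pos (by simp), if_neg hs]
        simp [hx]
    · by_cases hs : y ∈ seen
      · rw [if_pos (by simp [hs]), if_pos hs]
        exact ih seen
      · rw [if_neg (by simp [hs, hy]), if_neg hs]
        simp only [List.filter_cons]
        have hcongr : dseen (seen ++ [x] ++ [y]) ys = dseen (seen ++ [y] ++ [x]) ys := by
          apply dseen_congr
          intro a; simp; tauto
        rw [hcongr, ih (seen ++ [y])]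

theorem anbLoop1_eq (l2 : List String) (l1 acc : List String) :
    anbLoop1 l2 l1 acc = acc ++ (dseen acc l1).filter (fun a => decide (a ∈ l2)) := by
  induction l1 generalizing acc with
  | nil => simp [anbLoop1, dseen]
  | cons x xs ih =>
    simp only [anbLoop1, anbLoop2_eq, dseen]
    by_cases ha : x ∈ acc
    · rw [if_pos ha, if_neg (by simp [ha]), ih]
    · by_cases hl : x ∈ l2
      · rw [if_pos ⟨hl, ha⟩, if_neg ha, ih]
        simp [hl]
      · rw [if_neg (by simp [hl]), if_neg ha, ih]
        simp only [List.filter_cons, hl, decide_false, Bool.false_eq_true, if_false]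
        rw [dseen_filter_extra l2 x hl xs acc]

-- B's per-group filter against the intersection set equals plain membership in l2 on elements of l1
theorem filter_common_eq (l1 l2 : List String) :
    (PySem.List.dedup l1).filter
        (fun x => PySem.Set.contains (PySem.Set.inter (PySem.Set.ofList l1) (PySem.Set.ofList l2)) x) =
    (PySem.List.dedup l1).filter (fun a => decide (a ∈ l2)) := by
  apply List.filter_congr
  intro x hx
  have hx1 : x ∈ l1 := (PySem.List.mem_dedup l1 x).1 hx
  simp [PySem.Set.contains, PySem.Set.inter, PySem.Set.mem_ofList, hx1]

theorem group_eq (l1 l2 : List String) :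
    anbLoop1 l2 l1 [] =
      (PySem.List.dedup l1).filter
        (fun x => PySem.Set.contains (PySem.Set.inter (PySem.Set.ofList l1) (PySem.Set.ofList l2)) x) := by
  rw [anbLoop1_eq, filter_common_eq, dedup_eq_dseen]
  simp

-- ===== VERDICT (by name: the statement is the Claim_ definition above) =====
theorem anb_spec : Claim_equal_anb := by
  intro t1 t2 _ _
  unfold Spec_anb anb anb_alt
  apply List.map_congr_left
  intro i _
  exact group_eq _ _
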